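-- pv_equiv track=rewrite | github.com/Smith-Danielle/PythonPractice1 | main.py | hungry_foxes
-- ===== SOURCE A (Python) =====
-- def hungry_foxes(farm):
--     fox_chick = ""
--     temp = ""
--     fox_outside = False
--     cage = False
--     for x in farm:
--         if cage:
--             if x == ']':
--                 cage = False
--                 if 'F' in temp:
--                     fox_chick += temp.replace('C', '.')
--                 else:
--                     fox_chick += temp
--                 fox_chick += x
--                 temp = ""
--             else:
--                 temp += x
--         else:
--             if x == '[':
--                 cage = True
--                 if len(temp) > 0 and 'F' in temp:
--                     fox_chick += temp.replace('C', '.')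
--                     fox_outside = True
--                 elif len(temp) > 0:
--                     fox_chick += temp
--                 fox_chick += x
--                 temp = ""
--             else:
--                 temp += x
--
--     if len(temp) > 0:
--         if 'F' in temp:
--             fox_chick += temp.replace('C', '.')
--             fox_outside = True
--         else:
--             fox_chick += temp
--         temp = ""
--         cage = False
--
--     fox_check = ""
--     if fox_outside and '[' in farm:
--         for x in fox_chick:
--             if cage:
--                 if x == ']':
--                     cage = False
--                     fox_check += temp
--                     fox_check += x
--                     temp = ""
--                 else:
--                     temp += x
--             else:
--                 if x == '[':
--                     cage = True
--                     if len(temp) > 0: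
--                         fox_check += temp.replace('C', '.')
--                     fox_check += x
--                     temp = ""
--                 else:
--                     temp += x
--         if len(temp) > 0:
--                 fox_check += temp.replace('C', '.')
--         fox_chick = fox_check
--
--     return fox_chick
-- ===== SOURCE B (Python) =====
-- def hungry_foxes(farm):
--     # One tokenizing pass into (text, bracket) segments, then declarative joins.
--     segs = []
--     inside = False
--     cur = ""
--     for ch in farm:
--         if ch == (']' if inside else '['):
--             segs.append((cur, ch))
--             cur = ""
--             inside = not inside
--         else:
--             cur += ch
--     segs.append((cur, ""))
--     fox_outside = any(br != ']' and 'F' in s for s, br in segs)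
--     if fox_outside and '[' in farm:
--         return ''.join((s if br == ']' and 'F' not in s else s.replace('C', '.')) + br
--                        for s, br in segs)
--     return ''.join((s.replace('C', '.') if 'F' in s else s) + br for s, br in segs)
-- ===== Notes on version B (the rewrite author's own statement) =====
-- stated objective: simpler
-- what changed: B tokenizes the farm once into (text, bracket-toggle) segments and produces the answer with two declarative joins over that segment list, instead of A's two separate character-by-character state-machine passes that accumulate into temp strings; the second rebuild pass of A disappears entirely.
-- intended difference: On farms whose last character is an unmatched opening '[' (so A's pass-1 cage flag leaks into pass 2), with a fox in some outside region and an unprotected chick before the first ']', A's second pass misparses the leading outside region as caged and returns it with its chicks ('C') unreplaced, while B replaces every outside chick with '.', which is the intended behaviour once a fox is outside (e.g. A('C[a]F[') = 'C[a]F[' but B returns '.[a]F['). — e.g. on hungry_foxes("C[a]F["): A returns "C[a]F[", B returns ".[a]F["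
import Mathlib
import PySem

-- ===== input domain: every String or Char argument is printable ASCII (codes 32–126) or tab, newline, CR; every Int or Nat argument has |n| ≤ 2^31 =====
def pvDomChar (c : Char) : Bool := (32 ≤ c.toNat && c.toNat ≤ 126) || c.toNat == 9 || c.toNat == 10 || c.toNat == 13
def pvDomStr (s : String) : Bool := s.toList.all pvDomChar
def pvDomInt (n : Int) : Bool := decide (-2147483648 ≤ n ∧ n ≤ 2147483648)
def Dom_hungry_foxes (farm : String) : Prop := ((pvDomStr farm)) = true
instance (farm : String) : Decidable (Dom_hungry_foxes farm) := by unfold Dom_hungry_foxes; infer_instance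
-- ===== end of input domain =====

-- B tokenizes the farm once into (text, bracket) segments and assembles the answer with
-- two declarative joins, instead of A's two character-accumulating state-machine passes.

-- ===== PORT A =====
-- str.replace('C', '.') on single characters is exactly a character-wise map
def pvRep (l : List Char) : List Char := l.map (fun c => if c = 'C' then '.' else c)

def pvP1Step (st : List Char × List Char × Bool × Bool) (x : Char) :
    List Char × List Char × Bool × Bool :=
  match st with
  | (fc, temp, fo, cage) =>
    if cage then
      if x = ']' then
        ((fc ++ (if temp.contains 'F' then pvRep temp else temp)) ++ [x], [], fo, false)
      else (fc, temp ++ [x], fo, true)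
    else
      if x = '[' then
        ((if temp.length > 0 && temp.contains 'F' then fc ++ pvRep temp
          else if temp.length > 0 then fc ++ temp else fc) ++ [x], [],
         (if temp.length > 0 && temp.contains 'F' then true else fo), true)
      else (fc, temp ++ [x], fo, false)

def pvP2Step (st : List Char × List Char × Bool) (x : Char) : List Char × List Char × Bool :=
  match st with
  | (fc, temp, cage) =>
    if cage then
      if x = ']' then ((fc ++ temp) ++ [x], [], false)
      else (fc, temp ++ [x], true)
    else
      if x = '[' then ((if temp.length > 0 then fc ++ pvRep temp else fc) ++ [x], [], true)
      else (fc, temp ++ [x], false)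

-- the trailing `if len(temp) > 0:` block after pass 1's loop
def pvP1Tail (st : List Char × List Char × Bool × Bool) : List Char × Bool × Bool :=
  (if st.2.1.length > 0 then
     (if st.2.1.contains 'F' then st.1 ++ pvRep st.2.1 else st.1 ++ st.2.1) else st.1,
   if st.2.1.length > 0 then (if st.2.1.contains 'F' then true else st.2.2.1) else st.2.2.1,
   if st.2.1.length > 0 then false else st.2.2.2)

def hungry_foxes (farm : String) : String :=
  let l := farm.toList
  let st := pvP1Tail (l.foldl pvP1Step ([], [], false, false))
  if st.2.1 && l.contains '[' then
    let s2 := st.1.foldl pvP2Step ([], [], st.2.2)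
    String.ofList (if s2.2.1.length > 0 then s2.1 ++ pvRep s2.2.1 else s2.1)
  else String.ofList st.1

-- ===== PORT B =====
def pvSegs : List Char → Bool → List Char → List (List Char × Option Char)
  | [], _, cur => [(cur, none)]
  | c :: r, inside, cur =>
    if c = (if inside then ']' else '[') then (cur, some c) :: pvSegs r (!inside) []
    else pvSegs r inside (cur ++ [c])

def pvBr : Option Char → List Char
  | none => []
  | some c => [c]

def hungry_foxes_alt (farm : String) : String :=
  let sg := pvSegs farm.toList false []
  let foxOutside := sg.any (fun p => !(p.2 == some ']') && p.1.contains 'F')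
  if foxOutside && farm.toList.contains '[' then
    String.ofList (sg.flatMap
      (fun p => (if p.2 == some ']' && !(p.1.contains 'F') then p.1 else pvRep p.1) ++ pvBr p.2))
  else
    String.ofList (sg.flatMap
      (fun p => (if p.1.contains 'F' then pvRep p.1 else p.1) ++ pvBr p.2))

-- ===== PRECONDITION & SPEC =====
-- On farms whose last character is an unmatched opening '[' (A's pass-1 `cage` flag leaks into
-- pass 2), with a fox outside and an outside chick before the first ']', A's second pass
-- misparses the leading region as caged and leaves those chicks unreplaced; B replaces every
-- outside chick, which is the intended behaviour once a fox is outside.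
-- is position-by-position scanning inside a cage after reading l?
def pvIn (l : List Char) : Bool :=
  l.foldl (fun b c => if b then c != ']' else c == '[') false

def D_hungry_foxes (farm : String) : Prop :=
  let l := farm.toList
  let p := l.takeWhile (· != '[')
  pvIn l = true ∧ pvIn l.dropLast = false ∧
  (∃ i ∈ List.range l.length, l.getD i 'x' = 'F' ∧ pvIn (l.take i) = false) ∧
  'C' ∈ p.takeWhile (· != ']') ∧ 'F' ∉ p

instance (farm : String) : Decidable (D_hungry_foxes farm) := by
  unfold D_hungry_foxes; infer_instance

def Spec_hungry_foxes (farm : String) (out : String) : Prop :=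
  ¬ D_hungry_foxes farm → out = hungry_foxes_alt farm
instance (farm : String) (out : String) : Decidable (Spec_hungry_foxes farm out) := by
  unfold Spec_hungry_foxes; infer_instance

def pvDiffWitness_hungry_foxes : String := "C[a]F["
def pvDiffWitnessOut_hungry_foxes : String × String := ("C[a]F[", ".[a]F[")

-- ===== CLAIM (what is proved, stated in full; the proofs are below) =====
def Claim_unchanged_hungry_foxes : Prop :=
  ∀ (farm : String), Dom_hungry_foxes farm → Spec_hungry_foxes farm (hungry_foxes farm)
def Claim_changed_hungry_foxes : Prop :=
  Dom_hungry_foxes (pvDiffWitness_hungry_foxes) ∧ D_hungry_foxes (pvDiffWitness_hungry_foxes) ∧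
  hungry_foxes (pvDiffWitness_hungry_foxes) = pvDiffWitnessOut_hungry_foxes.1 ∧
  hungry_foxes_alt (pvDiffWitness_hungry_foxes) = pvDiffWitnessOut_hungry_foxes.2 ∧
  pvDiffWitnessOut_hungry_foxes.1 ≠ pvDiffWitnessOut_hungry_foxes.2
def Claim_exact_hungry_foxes : Prop :=
  ∀ (farm : String), Dom_hungry_foxes farm → D_hungry_foxes farm →
    hungry_foxes farm ≠ hungry_foxes_alt farm

-- ===== LEMMAS AND PROOFS =====

-- pass-1 render of a segment (text, optional closing bracket)
def pvSeg1 (p : List Char × Option Char) : List Char :=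
  (if p.1.contains 'F' then pvRep p.1 else p.1) ++ pvBr p.2
-- render after pass 2
def pvSeg2 (p : List Char × Option Char) : List Char :=
  (if p.2 == some ']' && !(p.1.contains 'F') then p.1 else pvRep p.1) ++ pvBr p.2
def pvAnyFox (sg : List (List Char × Option Char)) : Bool :=
  sg.any (fun p => !(p.2 == some ']') && p.1.contains 'F')

-- pass 1 ends inside a cage whose accumulated text is empty
def pvLeak : List Char → Bool → Bool → Bool
  | [], inside, curEmpty => inside && curEmpty
  | c :: r, inside, _ =>
    if c = (if inside then ']' else '[') then pvLeak r (!inside) true else pvLeak r inside false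

-- parse state (inside a cage?) after reading l
def pvParity : List Char → Bool → Bool
  | [], b => b
  | c :: r, b =>
    if b then pvParity r (c != ']') else if c = '[' then pvParity r true else pvParity r false

-- the characters of the farm that lie outside any cage
def pvOutChars : List Char → Bool → List Char
  | [], _ => []
  | c :: r, inside =>
    if inside then (if c = ']' then pvOutChars r false else pvOutChars r true)
    else (if c = '[' then pvOutChars r true else c :: pvOutChars r false)

theorem pvIn_eq : ∀ (l : List Char) (b : Bool),
    l.foldl (fun b c => if b then c != ']' else c == '[') b = pvParity l b := by
  intro l
  induction l with
  | nil => intro b; simp [pvParity]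
  | cons c r ih =>
    intro b
    cases b with
    | true =>
      by_cases hc : c = ']'
      · simp [pvParity, hc, ih]
      · have hb : (c != ']') = true := by simp [hc]
        simp [pvParity, hc, hb, ih]
    | false =>
      by_cases hc : c = '['
      · simp [pvParity, hc, ih]
      · have hb : (c == '[') = false := by simp [hc]
        simp [pvParity, hc, hb, ih]

-- a character of the outside text sits at a position whose prefix parses to "outside"
theorem outchars_pos : ∀ (l : List Char) (b : Bool), 'F' ∈ pvOutChars l b →
    ∃ i, i < l.length ∧ l.getD i 'x' = 'F' ∧ pvParity (l.take i) b = false := by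
  intro l
  induction l with
  | nil => intro b h; simp [pvOutChars] at h
  | cons c r ih =>
    intro b h
    cases b with
    | true =>
      by_cases hc : c = ']'
      · rw [pvOutChars, if_pos rfl, if_pos hc] at h
        obtain ⟨i, hi, hg, hp⟩ := ih false h
        refine ⟨i + 1, by simpa using hi, by simpa using hg, ?_⟩
        simp only [List.take_succ_cons, pvParity, hc, if_pos rfl]
        simpa [hc] using hp
      · rw [pvOutChars, if_pos rfl, if_neg hc] at h
        obtain ⟨i, hi, hg, hp⟩ := ih true h
        refine ⟨i + 1, by simpa using hi, by simpa using hg, ?_⟩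
        have hb : (c != ']') = true := by simp [hc]
        simp only [List.take_succ_cons, pvParity, hb, if_pos rfl]
        simpa using hp
    | false =>
      by_cases hc : c = '['
      · rw [pvOutChars, if_neg (by simp), if_pos hc] at h
        obtain ⟨i, hi, hg, hp⟩ := ih true h
        refine ⟨i + 1, by simpa using hi, by simpa using hg, ?_⟩
        simp only [List.take_succ_cons, pvParity, hc]
        simpa using hp
      · rw [pvOutChars, if_neg (by simp), if_neg hc] at h
        rcases List.mem_cons.mp h with h1 | h1
        · exact ⟨0, by simp, by simp [h1.symm], by simp [pvParity]⟩
        · obtain ⟨i, hi, hg, hp⟩ := ih false h1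
          refine ⟨i + 1, by simpa using hi, by simpa using hg, ?_⟩
          simp only [List.take_succ_cons, pvParity, hc]
          simpa [hc] using hp

theorem parity_append : ∀ (l1 l2 : List Char) (b : Bool),
    pvParity (l1 ++ l2) b = pvParity l2 (pvParity l1 b) := by
  intro l1
  induction l1 with
  | nil => intro l2 b; simp [pvParity]
  | cons c r ih =>
    intro l2 b
    cases b with
    | true =>
      by_cases hc : c = ']'
      · simp [pvParity, hc, ih]
      · have hb : (c != ']') = true := by simp [hc]
        simp [pvParity, hc, hb, ih]
    | false => by_cases hc : c = '[' <;> simp [pvParity, hc, ih]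

-- pass 1 leaks its cage flag exactly when the last character toggles from outside to inside
theorem leak_snoc : ∀ (l : List Char) (c : Char) (inside e : Bool),
    pvLeak (l ++ [c]) inside e = (!(pvParity l inside) && (c == '[')) := by
  intro l
  induction l with
  | nil =>
    intro c inside e
    cases inside with
    | true => by_cases hc : c = ']' <;> simp [pvLeak, pvParity, hc, beq_eq_false_iff_ne]
    | false => by_cases hc : c = '[' <;> simp [pvLeak, pvParity, hc, beq_eq_false_iff_ne]
  | cons d r ih =>
    intro c inside e
    cases inside with
    | true =>
      by_cases hd : d = ']'
      · simp [pvLeak, pvParity, hd, ih, beq_eq_false_iff_ne]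
      · have hb : (d != ']') = true := by simp [hd]
        simp [pvLeak, pvParity, hd, hb, ih, beq_eq_false_iff_ne]
    | false =>
      by_cases hd : d = '[' <;>
        simp [pvLeak, pvParity, hd, ih, beq_eq_false_iff_ne]

theorem pvRep_append (a b : List Char) : pvRep (a ++ b) = pvRep a ++ pvRep b := by
  simp [pvRep]

theorem pvRep_cons (a : Char) (b : List Char) :
    pvRep (a :: b) = (if a = 'C' then '.' else a) :: pvRep b := by
  simp [pvRep]

theorem pvRep_idem (s : List Char) : pvRep (pvRep s) = pvRep s := by
  simp only [pvRep, List.map_map]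
  apply List.map_congr_left
  intro c _
  by_cases h : c = 'C' <;> simp [h]

theorem pvRep_r1 (s : List Char) :
    pvRep (if s.contains 'F' then pvRep s else s) = pvRep s := by
  by_cases h : 'F' ∈ s <;> simp [h, pvRep_idem]

theorem pvRep_r1' (s : List Char) :
    pvRep (if 'F' ∈ s then pvRep s else s) = pvRep s := by
  by_cases h : 'F' ∈ s <;> simp [h, pvRep_idem]

theorem pvRep_not_mem (s : List Char) (c : Char) (hc : c ≠ '.') (h : c ∉ s) :
    c ∉ pvRep s := by
  simp only [pvRep, List.mem_map, not_exists]
  rintro x ⟨hx, hfx⟩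
  by_cases hxC : x = 'C'
  · subst hxC
    simp only [if_pos rfl] at hfx
    exact hc hfx.symm
  · rw [if_neg hxC] at hfx
    exact h (hfx ▸ hx)

theorem pvRep_no_C (s : List Char) (h : 'C' ∉ s) : pvRep s = s := by
  induction s with
  | nil => simp [pvRep]
  | cons a r ih =>
    simp only [List.mem_cons, not_or] at h
    rw [pvRep_cons, if_neg (fun hh => h.1 hh.symm), ih h.2]

theorem isEmpty_app_single (l : List Char) (c : Char) : (l ++ [c]).isEmpty = false := by simp

theorem pass1_eq : ∀ (l : List Char) (inside : Bool) (cur fc : List Char) (fo : Bool),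
    pvP1Tail (l.foldl pvP1Step (fc, cur, fo, inside)) =
      (fc ++ (pvSegs l inside cur).flatMap pvSeg1,
       fo || pvAnyFox (pvSegs l inside cur),
       pvLeak l inside cur.isEmpty) := by
  intro l
  induction l with
  | nil =>
    intro inside cur fc fo
    cases hc : cur with
    | nil => simp [pvP1Tail, pvSegs, pvSeg1, pvAnyFox, pvLeak, pvBr]
    | cons a r =>
      by_cases hF : 'F' ∈ a :: r <;>
        simp [pvP1Tail, pvSegs, pvSeg1, pvAnyFox, pvLeak, pvBr, hF, Bool.or_comm]
  | cons c rest ih =>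
    intro inside cur fc fo
    cases inside with
    | true =>
      by_cases hc : c = ']'
      · subst hc
        simp only [List.foldl_cons, pvP1Step, if_pos rfl, if_true]
        rw [ih]
        by_cases hF : 'F' ∈ cur <;>
          simp [pvSegs, pvSeg1, pvAnyFox, pvLeak, pvBr, hF, List.append_assoc]
      · simp only [List.foldl_cons, pvP1Step, if_neg hc, if_true]
        rw [ih]
        simp [pvSegs, pvLeak, hc, isEmpty_app_single]
    | false =>
      by_cases hc : c = '['
      · subst hc
        rw [List.foldl_cons]
        have step : pvP1Step (fc, cur, fo, false) '[' =
            ((fc ++ (if cur.contains 'F' then pvRep cur else cur)) ++ ['['], [],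
              fo || cur.contains 'F', true) := by
          by_cases hF : 'F' ∈ cur <;> cases cur <;> simp_all [pvP1Step, pvRep]
        rw [step, ih]
        simp [pvSegs, pvSeg1, pvAnyFox, pvLeak, pvBr, List.append_assoc, Bool.or_assoc]
      · simp only [List.foldl_cons, pvP1Step, if_neg hc, Bool.false_eq_true, if_false]
        rw [ih]
        simp [pvSegs, pvLeak, hc, isEmpty_app_single]

theorem pvSegs_tog (c : Char) (r : List Char) (inside : Bool) (cur : List Char)
    (hc : c = (if inside then ']' else '[')) :
    pvSegs (c :: r) inside cur = (cur, some c) :: pvSegs r (!inside) [] := by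
  rw [pvSegs, if_pos hc]

theorem pvSegs_nontog (c : Char) (r : List Char) (inside : Bool) (cur : List Char)
    (hc : ¬ c = (if inside then ']' else '[')) :
    pvSegs (c :: r) inside cur = pvSegs r inside (cur ++ [c]) := by
  rw [pvSegs, if_neg hc]

-- bridge: under the leak condition (empty trailing text), a fox is in some pass-1-outside
-- segment exactly when an 'F' lies among the outside-cage characters
theorem fox_bridge : ∀ (l : List Char) (inside : Bool) (cur : List Char),
    pvLeak l inside cur.isEmpty = true →
    (pvAnyFox (pvSegs l inside cur) = true ↔
      'F' ∈ ((if inside then [] else cur) ++ pvOutChars l inside)) := by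
  intro l
  induction l with
  | nil =>
    intro inside cur hleak
    simp only [pvLeak, Bool.and_eq_true] at hleak
    obtain ⟨h1, h2⟩ := hleak
    subst h1
    have : cur = [] := by simpa using h2
    subst this
    simp [pvSegs, pvAnyFox, pvOutChars]
  | cons c r ih =>
    intro inside cur hleak
    cases inside with
    | true =>
      by_cases hc : c = ']'
      · subst hc
        rw [pvSegs_tog ']' r true cur rfl]
        rw [pvLeak, if_pos rfl] at hleak
        have := ih false [] (by simpa using hleak)
        simp only [Bool.not_true] at *
        simpa [pvAnyFox, pvOutChars] using this
      · rw [pvSegs_nontog c r true cur (by simpa using hc)]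
        rw [pvLeak, if_neg (by simpa using hc)] at hleak
        have := ih true (cur ++ [c]) (by simpa [isEmpty_app_single] using hleak)
        simpa [pvOutChars, hc] using this
    | false =>
      by_cases hc : c = '['
      · subst hc
        rw [pvSegs_tog '[' r false cur rfl]
        rw [pvLeak, if_pos (show ('[' : Char) = (if (false : Bool) = true then ']' else '[')
          from rfl)] at hleak
        have h2 := ih true [] (by simpa using hleak)
        simp only [Bool.not_false] at *
        simp [pvAnyFox, pvOutChars] at h2 ⊢
        rw [h2]
      · rw [pvSegs_nontog c r false cur (by simpa using hc)]
        rw [pvLeak, if_neg (by simpa using hc)] at hleak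
        have := ih false (cur ++ [c]) (by simpa [isEmpty_app_single] using hleak)
        simpa [pvOutChars, hc, List.append_assoc] using this

-- shape of the segmentation: segment texts never contain their own toggle bracket
inductive PvShape : Bool → List (List Char × Option Char) → Prop
  | last (inside : Bool) (s : List Char)
      (h : (if inside then ']' else '[') ∉ s) : PvShape inside [(s, none)]
  | cons (inside : Bool) (s : List Char) (rest : List (List Char × Option Char))
      (h : (if inside then ']' else '[') ∉ s)
      (hr : PvShape (!inside) rest) :
      PvShape inside ((s, some (if inside then ']' else '[')) :: rest)

theorem shape_segs : ∀ (l : List Char) (inside : Bool) (cur : List Char),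
    (if inside then ']' else '[') ∉ cur → PvShape inside (pvSegs l inside cur) := by
  intro l
  induction l with
  | nil => intro inside cur h; exact PvShape.last inside cur h
  | cons c rest ih =>
    intro inside cur h
    by_cases hc : c = (if inside then ']' else '[')
    · rw [pvSegs, if_pos hc, hc]
      exact PvShape.cons inside cur _ h (ih (!inside) [] (by simp))
    · rw [pvSegs, if_neg hc]
      refine ih inside (cur ++ [c]) ?_
      simp only [List.mem_append, List.mem_singleton, not_or]
      exact ⟨h, fun hh => hc hh.symm⟩

-- pass-2 fold over text free of the relevant bracket only accumulates
theorem fold2_out : ∀ (s fc temp : List Char), '[' ∉ s →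
    s.foldl pvP2Step (fc, temp, false) = (fc, temp ++ s, false) := by
  intro s
  induction s with
  | nil => intro fc temp h; simp
  | cons c r ih =>
    intro fc temp h
    simp only [List.mem_cons, not_or] at h
    have hc : ¬ c = '[' := fun hh => h.1 hh.symm
    simp only [List.foldl_cons, pvP2Step, Bool.false_eq_true, if_false, if_neg hc]
    rw [ih _ _ h.2]
    simp

theorem fold2_in : ∀ (s fc temp : List Char), ']' ∉ s →
    s.foldl pvP2Step (fc, temp, true) = (fc, temp ++ s, true) := by
  intro s
  induction s with
  | nil => intro fc temp h; simp
  | cons c r ih =>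
    intro fc temp h
    simp only [List.mem_cons, not_or] at h
    have hc : ¬ c = ']' := fun hh => h.1 hh.symm
    simp only [List.foldl_cons, pvP2Step, if_true, if_neg hc]
    rw [ih _ _ h.2]
    simp

theorem if_len_rep (t f : List Char) :
    (if t.length > 0 then f ++ pvRep t else f) = f ++ pvRep t := by
  cases t <;> simp [pvRep]

theorem r1_not_mem (s : List Char) (c : Char) (hc : c ≠ '.') (h : c ∉ s) :
    c ∉ (if s.contains 'F' then pvRep s else s) := by
  by_cases hF : 'F' ∈ s
  · simpa [hF] using pvRep_not_mem s c hc h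
  · simpa [hF] using h

-- the whole of pass 2 (loop + trailing replace)
def pvP2Run (xs : List Char) (st : List Char × List Char × Bool) : List Char :=
  let r := xs.foldl pvP2Step st
  if r.2.1.length > 0 then r.1 ++ pvRep r.2.1 else r.1

theorem pvP2Run_eq (xs : List Char) (st : List Char × List Char × Bool) :
    pvP2Run xs st = (xs.foldl pvP2Step st).1 ++ pvRep (xs.foldl pvP2Step st).2.1 := by
  simp only [pvP2Run]
  cases h : (xs.foldl pvP2Step st).2.1 <;> simp [h, pvRep]

-- pass 2, started in the state matching the segmentation parity, rewrites pass-1 output to pvSeg2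
theorem pass2_shape : ∀ (inside : Bool) (xs : List (List Char × Option Char)),
    PvShape inside xs → ∀ fc : List Char,
    pvP2Run (xs.flatMap pvSeg1) (fc, [], inside) = fc ++ xs.flatMap pvSeg2 := by
  intro inside xs h
  induction h with
  | last inside s hs =>
    intro fc
    rw [pvP2Run_eq]
    cases inside with
    | true =>
      have hns : ']' ∉ (if s.contains 'F' then pvRep s else s) :=
        r1_not_mem s ']' (by decide) (by simpa using hs)
      simp only [List.flatMap_cons, List.flatMap_nil, List.append_nil, pvSeg1, pvSeg2, pvBr]
      rw [fold2_in _ _ _ hns]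
      simp [pvRep_r1, pvRep_r1']
    | false =>
      have hns : '[' ∉ (if s.contains 'F' then pvRep s else s) :=
        r1_not_mem s '[' (by decide) (by simpa using hs)
      simp only [List.flatMap_cons, List.flatMap_nil, List.append_nil, pvSeg1, pvSeg2, pvBr]
      rw [fold2_out _ _ _ hns]
      simp [pvRep_r1, pvRep_r1']
  | cons inside s rest hs hr ih =>
    intro fc
    rw [pvP2Run_eq]
    cases inside with
    | true =>
      have hns : ']' ∉ (if s.contains 'F' then pvRep s else s) :=
        r1_not_mem s ']' (by decide) (by simpa using hs)
      simp only [List.flatMap_cons, pvSeg1, pvBr, List.append_assoc, List.foldl_append]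
      rw [fold2_in _ _ _ hns]
      simp only [List.foldl_cons, List.foldl_nil, pvP2Step, if_true, if_pos rfl, List.nil_append]
      have hmain := ih (fc ++ ((if s.contains 'F' then pvRep s else s) ++ [']']))
      rw [pvP2Run_eq] at hmain
      simp only [Bool.not_true] at hmain
      by_cases hF : 'F' ∈ s <;> simp_all [pvSeg2, pvBr, List.append_assoc]
    | false =>
      have hns : '[' ∉ (if s.contains 'F' then pvRep s else s) :=
        r1_not_mem s '[' (by decide) (by simpa using hs)
      simp only [List.flatMap_cons, pvSeg1, pvBr, List.append_assoc, List.foldl_append]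
      rw [fold2_out _ _ _ hns]
      simp only [List.foldl_cons, List.foldl_nil, pvP2Step, Bool.false_eq_true, if_false,
        if_pos rfl, List.nil_append, if_len_rep]
      have hmain := ih (fc ++ (pvRep (if s.contains 'F' then pvRep s else s) ++ ['[']))
      rw [pvP2Run_eq] at hmain
      simp only [Bool.not_false] at hmain
      by_cases hF : 'F' ∈ s <;> simp_all [pvSeg2, pvBr, pvRep_idem, List.append_assoc]

-- splitting a list at the first occurrence of a character it contains
theorem split_at_mem : ∀ (p : List Char) (a : Char), a ∈ p →
    p = p.takeWhile (fun c => !(c == a)) ++ a :: (p.dropWhile (fun c => !(c == a))).tail ∧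
    a ∉ p.takeWhile (fun c => !(c == a)) := by
  intro p
  induction p with
  | nil => intro a h; simp at h
  | cons c r ih =>
    intro a h
    by_cases hc : c = a
    · subst hc
      simp [List.takeWhile_cons, List.dropWhile_cons]
    · have hr : a ∈ r := by
        rcases List.mem_cons.mp h with h1 | h1
        · exact absurd h1.symm hc
        · exact h1
      obtain ⟨ih1, ih2⟩ := ih a hr
      refine ⟨?_, ?_⟩
      · conv_lhs => rw [ih1]
        simp [List.takeWhile_cons, List.dropWhile_cons, hc]
      · simp only [List.takeWhile_cons]
        simp only [show (!(c == a)) = true from by simp [hc], if_true, List.mem_cons, not_or]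
        exact ⟨fun hh => hc hh.symm, ih2⟩

theorem takeWhile_all (p : List Char) (a : Char) (h : a ∉ p) :
    p.takeWhile (fun c => !(c == a)) = p := by
  rw [List.takeWhile_eq_self_iff]
  intro x hx
  simp only [Bool.not_eq_eq_eq_not, Bool.not_true, beq_eq_false_iff_ne]
  rintro rfl
  exact h hx

-- segmentation exposes its first segment when the toggle bracket occurs
theorem segs_split : ∀ (l : List Char) (inside : Bool) (cur : List Char),
    (if inside then ']' else '[') ∈ l →
    pvSegs l inside cur =
      (cur ++ l.takeWhile (fun c => !(c == (if inside then ']' else '['))),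
        some (if inside then ']' else '[')) ::
      pvSegs ((l.dropWhile (fun c => !(c == (if inside then ']' else '[')))).tail) (!inside) [] := by
  intro l
  induction l with
  | nil => intro inside cur h; simp at h
  | cons c r ih =>
    intro inside cur h
    by_cases hc : c = (if inside then ']' else '[')
    · rw [pvSegs, if_pos hc]
      simp [List.takeWhile, List.dropWhile, hc]
    · have hr : (if inside then ']' else '[') ∈ r := by
        rcases List.mem_cons.mp h with h1 | h1
        · exact absurd h1.symm hc
        · exact h1
      rw [pvSegs, if_neg hc]
      rw [ih inside (cur ++ [c]) hr]
      have hcb : (c == (if inside then ']' else '[')) = false := by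
        simpa [beq_eq_false_iff_ne] using hc
      simp [List.takeWhile, List.dropWhile, hcb, List.append_assoc]

-- with no ']' anywhere, pass 2's rewrite is just a global replace
theorem noclose_lemma : ∀ (l : List Char) (inside : Bool) (cur : List Char),
    ']' ∉ l → ']' ∉ cur →
    ']' ∉ (pvSegs l inside cur).flatMap pvSeg1 ∧
    (pvSegs l inside cur).flatMap pvSeg2 = pvRep ((pvSegs l inside cur).flatMap pvSeg1) := by
  intro l
  induction l with
  | nil =>
    intro inside cur hl hcur
    constructor
    · simpa [pvSegs, pvSeg1, pvBr] using r1_not_mem cur ']' (by decide) hcur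
    · by_cases hF : 'F' ∈ cur <;>
        simp [pvSegs, pvSeg1, pvSeg2, pvBr, hF, pvRep_idem]
  | cons c r ih =>
    intro inside cur hl hcur
    simp only [List.mem_cons, not_or] at hl
    have hcne : c ≠ ']' := fun hh => hl.1 hh.symm
    by_cases hc : c = (if inside then ']' else '[')
    · have hin : inside = false := by
        cases inside
        · rfl
        · simp only [if_true] at hc; exact absurd hc hcne
      subst hin
      simp only [Bool.false_eq_true, if_false] at hc
      rw [pvSegs_tog c r false cur (by simp [hc]), hc]
      have hrec := ih true [] hl.2 (by simp)
      constructor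
      · simp only [List.flatMap_cons, pvSeg1, pvBr, Bool.not_false, List.mem_append, not_or]
        refine ⟨⟨r1_not_mem cur ']' (by decide) hcur, by simp⟩, ?_⟩
        simpa using hrec.1
      · simp only [List.flatMap_cons, pvSeg1, pvSeg2, pvBr, Bool.not_false]
        rw [pvRep_append, pvRep_append]
        rw [show pvRep ['['] = ['['] from by simp [pvRep]]
        rw [pvRep_r1, hrec.2]
        simp
    · rw [pvSegs_nontog c r inside cur hc]
      exact ih inside (cur ++ [c]) hl.2 (by
        simp only [List.mem_append, List.mem_singleton, not_or]
        exact ⟨hcur, fun hh => hcne hh.symm⟩)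

theorem fold_all_in (xs fc : List Char) (h : ']' ∉ xs) :
    pvP2Run xs (fc, [], true) = fc ++ pvRep xs := by
  simp only [pvP2Run]
  rw [fold2_in _ _ _ h]
  simp [if_len_rep]

theorem p2_open (fc temp : List Char) :
    pvP2Step (fc, temp, false) '[' = ((fc ++ pvRep temp) ++ ['['], [], true) := by
  simp [pvP2Step, if_len_rep]

theorem p2_close (fc temp : List Char) :
    pvP2Step (fc, temp, true) ']' = ((fc ++ temp) ++ [']'], [], false) := by
  simp [pvP2Step]

-- leaked pass 2 keeps everything before the first ']' verbatim, then proceeds normally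
theorem leak_run1 : ∀ (REST : List (List Char × Option Char)), PvShape true REST →
    ∀ (q' r'' : List Char), ']' ∉ q' → '[' ∉ r'' →
    pvP2Run (q' ++ ']' :: (r'' ++ '[' :: REST.flatMap pvSeg1)) ([], [], true) =
    q' ++ ']' :: (pvRep r'' ++ '[' :: REST.flatMap pvSeg2) := by
  intro REST hshape_rest q' r'' hq' hr''
  rw [pvP2Run_eq, List.foldl_append, fold2_in _ _ _ hq', List.foldl_cons, p2_close,
    List.nil_append]
  rw [show (r'' ++ '[' :: REST.flatMap pvSeg1) =
      (r'' ++ ['[']) ++ REST.flatMap pvSeg1 from by simp]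
  rw [List.foldl_append, List.foldl_append, fold2_out _ _ _ hr'', List.foldl_cons,
    List.foldl_nil, p2_open]
  simp only [List.nil_append]
  have hmain := pass2_shape true REST hshape_rest (((q' ++ [']']) ++ pvRep r'') ++ ['['])
  rw [pvP2Run_eq] at hmain
  rw [hmain]
  simp

-- leaked pass 2 when the first ']' closes the first cage
theorem leak_run2 : ∀ (REST2 : List (List Char × Option Char)), PvShape false REST2 →
    ∀ (a t : List Char), ']' ∉ a → ']' ∉ t →
    pvP2Run (a ++ '[' :: (t ++ ']' :: REST2.flatMap pvSeg1)) ([], [], true) =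
    (a ++ '[' :: t) ++ ']' :: REST2.flatMap pvSeg2 := by
  intro REST2 hsh a t ha ht
  have hpre : ']' ∉ a ++ '[' :: t := by
    simp only [List.mem_append, List.mem_cons, not_or]
    exact ⟨ha, by decide, ht⟩
  rw [pvP2Run_eq]
  rw [show a ++ '[' :: (t ++ ']' :: REST2.flatMap pvSeg1) =
      (a ++ '[' :: t) ++ (']' :: REST2.flatMap pvSeg1) from by simp]
  rw [List.foldl_append, fold2_in _ _ _ hpre, List.foldl_cons, p2_close]
  simp only [List.nil_append]
  have hmain := pass2_shape false REST2 hsh ((a ++ '[' :: t) ++ [']'])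
  rw [pvP2Run_eq] at hmain
  rw [hmain]
  simp

-- the leak case: pass 2 entered with cage = true still agrees outside D_
theorem leak_case : ∀ (l : List Char),
    '[' ∈ l →
    ¬ (']' ∈ l ∧
       'C' ∈ (l.takeWhile (fun c => !(c == '['))).takeWhile (fun c => !(c == ']')) ∧
       'F' ∉ l.takeWhile (fun c => !(c == '['))) →
    pvP2Run ((pvSegs l false []).flatMap pvSeg1) ([], [], true) =
      (pvSegs l false []).flatMap pvSeg2 := by
  intro l hopen hnd
  by_cases hclose : ']' ∈ l
  · set p := l.takeWhile (fun c => !(c == '[')) with hp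
    set REST := pvSegs ((l.dropWhile (fun c => !(c == '['))).tail) true [] with hREST
    have hsplit : pvSegs l false [] = (p, some '[') :: REST := by
      have := segs_split l false [] (by simpa using hopen)
      simpa using this
    have hldec := (split_at_mem l '[' hopen).1
    have hpnotog : '[' ∉ p := by
      have := (split_at_mem l '[' hopen).2
      simpa [hp] using this
    have hshape_rest : PvShape true REST := shape_segs _ true [] (by simp)
    have hqf : ¬ ('C' ∈ p.takeWhile (fun c => !(c == ']')) ∧ 'F' ∉ p) :=
      fun hh => hnd ⟨hclose, hh.1, hh.2⟩
    by_cases hpin : ']' ∈ p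
    · -- the first ']' lies in the leading outside text p
      obtain ⟨hpdec, hqno⟩ := split_at_mem p ']' hpin
      set q := p.takeWhile (fun c => !(c == ']')) with hq
      set r' := (p.dropWhile (fun c => !(c == ']'))).tail with hr'
      have hpr : '[' ∉ q ∧ '[' ∉ r' := by
        rw [hpdec] at hpnotog
        simp only [List.mem_append, List.mem_cons, not_or] at hpnotog
        exact ⟨hpnotog.1, hpnotog.2.2⟩
      have key : ∀ q' r'' : List Char, ']' ∉ q' → '[' ∉ r'' →
          pvP2Run ((q' ++ ']' :: (r'' ++ '[' :: REST.flatMap pvSeg1))) ([], [], true) =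
          q' ++ ']' :: (pvRep r'' ++ '[' :: REST.flatMap pvSeg2) := by
        intro q' r'' hq' hr''
        rw [pvP2Run_eq, List.foldl_append, fold2_in _ _ _ hq', List.foldl_cons, p2_close,
          List.nil_append]
        rw [show (r'' ++ '[' :: REST.flatMap pvSeg1) =
            (r'' ++ ['[']) ++ REST.flatMap pvSeg1 from by simp]
        rw [List.foldl_append, List.foldl_append, fold2_out _ _ _ hr'', List.foldl_cons,
          List.foldl_nil, p2_open]
        simp only [List.nil_append]
        have hmain := pass2_shape true REST hshape_rest (((q' ++ [']']) ++ pvRep r'') ++ ['['])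
        rw [pvP2Run_eq] at hmain
        rw [hmain]
        simp
      rw [hsplit]
      simp only [List.flatMap_cons, pvSeg1, pvSeg2, pvBr]
      by_cases hF : 'F' ∈ p
      · have h1 : (if p.contains 'F' then pvRep p else p) = pvRep q ++ ']' :: pvRep r' := by
          rw [if_pos (by simpa using hF)]
          conv_lhs => rw [hpdec]
          simp [pvRep_append, pvRep_cons]
        have h2 : (if (some '[' == some ']' && !p.contains 'F') = true then p else pvRep p) =
            pvRep q ++ ']' :: pvRep r' := by
          rw [if_neg (by simp)]
          conv_lhs => rw [hpdec]
          simp [pvRep_append, pvRep_cons]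
        rw [h1, h2]
        rw [show (pvRep q ++ ']' :: pvRep r') ++ ['['] ++ REST.flatMap pvSeg1 =
            pvRep q ++ ']' :: (pvRep r' ++ '[' :: REST.flatMap pvSeg1) from by simp]
        rw [key (pvRep q) (pvRep r') (pvRep_not_mem q ']' (by decide) hqno)
          (pvRep_not_mem r' '[' (by decide) hpr.2)]
        simp [pvRep_idem]
      · have hCq : 'C' ∉ q := fun hcq => hqf ⟨hcq, hF⟩
        have h1 : (if p.contains 'F' then pvRep p else p) = q ++ ']' :: r' := by
          rw [if_neg (by simpa using hF)]
          exact hpdec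
        have h2 : (if (some '[' == some ']' && !p.contains 'F') = true then p else pvRep p) =
            q ++ ']' :: pvRep r' := by
          rw [if_neg (by simp)]
          conv_lhs => rw [hpdec]
          simp [pvRep_append, pvRep_cons, pvRep_no_C q hCq]
        rw [h1, h2]
        rw [show (q ++ ']' :: r') ++ ['['] ++ REST.flatMap pvSeg1 =
            q ++ ']' :: (r' ++ '[' :: REST.flatMap pvSeg1) from by simp]
        rw [key q r' hqno hpr.2]
        simp
    · -- ']' is not in p: the first ']' closes the first cage
      have hr1p : (if p.contains 'F' then pvRep p else p) = pvRep p := by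
        by_cases hF : 'F' ∈ p
        · simp [hF]
        · have hq_eq : p.takeWhile (fun c => !(c == ']')) = p := takeWhile_all p ']' hpin
          have hCp : 'C' ∉ p := fun hcp => hqf ⟨by rw [hq_eq]; exact hcp, hF⟩
          simp [hF, pvRep_no_C p hCp]
      set l' := (l.dropWhile (fun c => !(c == '['))).tail with hl'
      have hl'close : ']' ∈ l' := by
        rw [hldec] at hclose
        simp only [List.mem_append, List.mem_cons] at hclose
        rcases hclose with h1 | h1 | h1
        · exact absurd h1 hpin
        · exact absurd h1.symm (by decide)
        · exact h1
      set s1 := l'.takeWhile (fun c => !(c == ']')) with hs1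
      set REST2 := pvSegs ((l'.dropWhile (fun c => !(c == ']'))).tail) false [] with hREST2
      have hsplit2 : REST = (s1, some ']') :: REST2 := by
        have := segs_split l' true [] (by simpa using hl'close)
        simpa using this
      have hs1no : ']' ∉ s1 := (split_at_mem l' ']' hl'close).2
      have hshape2 : PvShape false REST2 := shape_segs _ false [] (by simp)
      rw [hsplit, hsplit2]
      simp only [List.flatMap_cons, pvSeg1, pvSeg2, pvBr, hr1p]
      have hs1r1 : ']' ∉ (if s1.contains 'F' then pvRep s1 else s1) :=
        r1_not_mem s1 ']' (by decide) hs1no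
      have hprefix : ']' ∉ pvRep p ++ '[' :: (if s1.contains 'F' then pvRep s1 else s1) := by
        simp only [List.mem_append, List.mem_cons, not_or]
        exact ⟨pvRep_not_mem p ']' (by decide) hpin, by decide, hs1r1⟩
      rw [show pvRep p ++ ['['] ++ (((if s1.contains 'F' then pvRep s1 else s1) ++ [']']) ++
            REST2.flatMap pvSeg1) =
          (pvRep p ++ '[' :: (if s1.contains 'F' then pvRep s1 else s1)) ++
            (']' :: REST2.flatMap pvSeg1) from by simp]
      rw [pvP2Run_eq, List.foldl_append, fold2_in _ _ _ hprefix, List.foldl_cons, p2_close]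
      simp only [List.nil_append]
      have hmain := pass2_shape false REST2 hshape2
        ((pvRep p ++ '[' :: (if s1.contains 'F' then pvRep s1 else s1)) ++ [']'])
      rw [pvP2Run_eq] at hmain
      rw [hmain]
      by_cases hF1 : 'F' ∈ s1 <;> simp [hF1, List.append_assoc]
  · -- no ']' anywhere: pass 2 is a global replace on both sides
    have hnc := noclose_lemma l false [] hclose (by simp)
    rw [fold_all_in _ _ hnc.1, hnc.2]
    simp

theorem main_eq (farm : String) (h : ¬ D_hungry_foxes farm) :
    hungry_foxes farm = hungry_foxes_alt farm := by
  have halt : hungry_foxes_alt farm =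
      (if (pvAnyFox (pvSegs farm.toList false []) && farm.toList.contains '[') = true then
        String.ofList ((pvSegs farm.toList false []).flatMap pvSeg2)
      else String.ofList ((pvSegs farm.toList false []).flatMap pvSeg1)) := rfl
  rw [halt]
  simp only [hungry_foxes]
  rw [pass1_eq farm.toList false [] [] false]
  simp only [List.isEmpty_nil, List.nil_append, Bool.false_or]
  by_cases hrun : (pvAnyFox (pvSegs farm.toList false []) && farm.toList.contains '[') = true
  · rw [if_pos hrun, if_pos hrun]
    have hopen : '[' ∈ farm.toList := by
      have := (Bool.and_eq_true_iff.mp hrun).2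
      simpa using this
    by_cases hleak : pvLeak farm.toList false true = true
    · rw [hleak]
      have hfo : pvAnyFox (pvSegs farm.toList false []) = true := (Bool.and_eq_true_iff.mp hrun).1
      have hfo2 : ∃ i ∈ List.range farm.toList.length,
          farm.toList.getD i 'x' = 'F' ∧ pvIn (farm.toList.take i) = false := by
        have hmem := (fox_bridge farm.toList false [] (by simpa using hleak)).mp hfo
        obtain ⟨i, hi, hg, hp⟩ := outchars_pos farm.toList false (by simpa using hmem)
        exact ⟨i, by simpa using hi, hg, by rw [pvIn, pvIn_eq]; exact hp⟩
      obtain ⟨dl, c, hdl⟩ : ∃ dl c, farm.toList = dl ++ [c] := by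
        rcases List.eq_nil_or_concat farm.toList with h0 | ⟨dl, c, h0⟩
        · rw [h0] at hopen; simp at hopen
        · exact ⟨dl, c, by simpa using h0⟩
      have hsn : (!(pvParity dl false) && (c == '[')) = true := by
        rw [← leak_snoc dl c false true, ← hdl]; exact hleak
      have hpd : pvParity dl false = false := by
        rcases Bool.and_eq_true_iff.mp hsn with ⟨h1, _⟩
        simpa using h1
      have hcop : c = '[' := by
        rcases Bool.and_eq_true_iff.mp hsn with ⟨_, h2⟩
        simpa using h2
      have hD1 : pvIn farm.toList = true := by
        rw [pvIn, pvIn_eq, hdl, parity_append, hpd, hcop]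
        simp [pvParity]
      have hD2 : pvIn farm.toList.dropLast = false := by
        rw [hdl, List.dropLast_concat, pvIn, pvIn_eq]
        exact hpd
      have hnd : ¬ (']' ∈ farm.toList ∧
          'C' ∈ (farm.toList.takeWhile (fun c => !(c == '['))).takeWhile (fun c => !(c == ']')) ∧
          'F' ∉ farm.toList.takeWhile (fun c => !(c == '['))) := by
        intro hh
        exact h ⟨hD1, hD2, hfo2, hh.2.1, hh.2.2⟩
      have hfin := leak_case farm.toList hopen hnd
      exact congrArg String.ofList hfin
    · have hnl : pvLeak farm.toList false true = false := by simpa using hleak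
      rw [hnl]
      have hfin := pass2_shape false (pvSegs farm.toList false [])
        (shape_segs _ false [] (by simp)) []
      rw [List.nil_append] at hfin
      exact congrArg String.ofList hfin
  · rw [if_neg hrun, if_neg hrun]

theorem pvRep_length (x : List Char) : (pvRep x).length = x.length := by simp [pvRep]

theorem rep_ne_of_memC (x : List Char) (h : 'C' ∈ x) : x ≠ pvRep x := by
  intro heq
  obtain ⟨i, hi, hx⟩ := List.mem_iff_getElem.mp h
  have h2 : (pvRep x)[i]? = x[i]? := by rw [← heq]
  rw [List.getElem?_eq_getElem hi, List.getElem?_eq_getElem (by simpa [pvRep_length] using hi)]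
    at h2
  simp [pvRep, hx] at h2

theorem inside_out_nil (x : List Char) (h : ']' ∉ x) : pvOutChars x true = [] := by
  induction x with
  | nil => simp [pvOutChars]
  | cons c r ih =>
    simp only [List.mem_cons, not_or] at h
    have hcne : ¬ c = ']' := fun hh => h.1 hh.symm
    rw [pvOutChars, if_pos rfl, if_neg hcne]
    exact ih h.2

theorem noclose_out (l : List Char) (h : ']' ∉ l) :
    pvOutChars l false = l.takeWhile (fun c => !(c == '[')) := by
  induction l with
  | nil => simp [pvOutChars]
  | cons c r ih =>
    simp only [List.mem_cons, not_or] at h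
    by_cases hc : c = '['
    · rw [pvOutChars, if_neg (by simp), if_pos hc, inside_out_nil r h.2]
      rw [List.takeWhile_cons, if_neg (by simp [hc])]
    · rw [pvOutChars, if_neg (by simp), if_neg hc]
      rw [List.takeWhile_cons, if_pos (by simp [hc])]
      rw [ih h.2]

-- converse of outchars_pos
theorem outpos_mem : ∀ (l : List Char) (b : Bool) (i : Nat), i < l.length →
    l.getD i 'x' = 'F' → pvParity (l.take i) b = false → 'F' ∈ pvOutChars l b := by
  intro l
  induction l with
  | nil => intro b i hi _ _; simp at hi
  | cons c r ih =>
    intro b i hi hg hp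
    cases i with
    | zero =>
      simp only [List.take_zero, pvParity] at hp
      subst hp
      simp only [List.getD_cons_zero] at hg
      rw [pvOutChars, if_neg (by simp), if_neg (by rw [hg]; decide)]
      simp [hg]
    | succ j =>
      simp only [List.length_cons, Nat.succ_lt_succ_iff] at hi
      simp only [List.getD_cons_succ] at hg
      simp only [List.take_succ_cons] at hp
      cases b with
      | true =>
        by_cases hc : c = ']'
        · rw [pvOutChars, if_pos rfl, if_pos hc]
          refine ih false j hi hg ?_
          rw [pvParity, if_pos rfl, show (c != ']') = false from by simp [hc]] at hp
          exact hp
        · rw [pvOutChars, if_pos rfl, if_neg hc]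
          refine ih true j hi hg ?_
          rw [pvParity, if_pos rfl, show (c != ']') = true from by simp [hc]] at hp
          exact hp
      | false =>
        by_cases hc : c = '['
        · rw [pvOutChars, if_neg (by simp), if_pos hc]
          refine ih true j hi hg ?_
          rw [pvParity, if_neg (by simp), if_pos hc] at hp
          exact hp
        · rw [pvOutChars, if_neg (by simp), if_neg hc]
          refine List.mem_cons_of_mem c (ih false j hi hg ?_)
          rw [pvParity, if_neg (by simp), if_neg hc] at hp
          exact hp

theorem diff_case (farm : String) (hD : D_hungry_foxes farm) :
    hungry_foxes farm ≠ hungry_foxes_alt farm := by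
  have hD' := hD
  unfold D_hungry_foxes at hD'
  obtain ⟨hIn, hInd, hfoxE, hCq, hFp⟩ := hD'
  have hne : farm.toList ≠ [] := by
    intro h0
    rw [h0] at hIn
    simp [pvIn] at hIn
  obtain ⟨dl, c, hdl⟩ : ∃ dl c, farm.toList = dl ++ [c] := by
    rcases List.eq_nil_or_concat farm.toList with h0 | ⟨dl, c, h0⟩
    · exact absurd h0 hne
    · exact ⟨dl, c, by simpa using h0⟩
  have hpd : pvParity dl false = false := by
    rw [hdl, List.dropLast_concat, pvIn, pvIn_eq] at hInd
    exact hInd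
  have hcop : c = '[' := by
    rw [pvIn, pvIn_eq, hdl, parity_append, hpd] at hIn
    by_cases hc : c = '['
    · exact hc
    · rw [pvParity, if_neg (by simp), if_neg hc, pvParity] at hIn
      exact absurd hIn (by simp)
  have hleak : pvLeak farm.toList false true = true := by
    rw [hdl, leak_snoc, hpd, hcop]
    simp
  have hopen : '[' ∈ farm.toList := by
    rw [hdl, hcop]
    simp
  have hfoxmem : 'F' ∈ pvOutChars farm.toList false := by
    obtain ⟨i, hir, hg, hp⟩ := hfoxE
    refine outpos_mem farm.toList false i (by simpa using hir) hg ?_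
    rw [pvIn, pvIn_eq] at hp
    exact hp
  have hclose : ']' ∈ farm.toList := by
    by_contra hno
    rw [noclose_out farm.toList hno] at hfoxmem
    exact hFp hfoxmem
  have hfo : pvAnyFox (pvSegs farm.toList false []) = true :=
    (fox_bridge farm.toList false [] (by simpa using hleak)).mpr (by simpa using hfoxmem)
  have hrun : (pvAnyFox (pvSegs farm.toList false []) && farm.toList.contains '[') = true := by
    simp [hfo, hopen]
  have hA : hungry_foxes farm =
      String.ofList (pvP2Run ((pvSegs farm.toList false []).flatMap pvSeg1) ([], [], true)) := by
    simp only [hungry_foxes]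
    rw [pass1_eq farm.toList false [] [] false]
    simp only [List.isEmpty_nil, List.nil_append, Bool.false_or]
    rw [if_pos hrun, hleak]
    rfl
  have hB : hungry_foxes_alt farm =
      String.ofList ((pvSegs farm.toList false []).flatMap pvSeg2) := by
    have halt : hungry_foxes_alt farm =
        (if (pvAnyFox (pvSegs farm.toList false []) && farm.toList.contains '[') = true then
          String.ofList ((pvSegs farm.toList false []).flatMap pvSeg2)
        else String.ofList ((pvSegs farm.toList false []).flatMap pvSeg1)) := rfl
    rw [halt, if_pos hrun]
  rw [hA, hB]
  intro heq
  have heql : pvP2Run ((pvSegs farm.toList false []).flatMap pvSeg1) ([], [], true) =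
      (pvSegs farm.toList false []).flatMap pvSeg2 := by
    have := congrArg String.toList heq
    simpa using this
  -- structure of the segmentation
  have hsplit : pvSegs farm.toList false [] =
      (farm.toList.takeWhile (fun c => !(c == '[')), some '[') ::
        pvSegs ((farm.toList.dropWhile (fun c => !(c == '['))).tail) true [] := by
    have := segs_split farm.toList false [] (by simpa using hopen)
    simpa using this
  have hFp' : 'F' ∉ farm.toList.takeWhile (fun c => !(c == '[')) := hFp
  have hpnotog : '[' ∉ farm.toList.takeWhile (fun c => !(c == '[')) :=
    (split_at_mem farm.toList '[' hopen).2
  have hshape_rest : PvShape true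
      (pvSegs ((farm.toList.dropWhile (fun c => !(c == '['))).tail) true []) :=
    shape_segs _ true [] (by simp)
  have hr1p : (if (farm.toList.takeWhile (fun c => !(c == '['))).contains 'F' then
      pvRep (farm.toList.takeWhile (fun c => !(c == '['))) else
      farm.toList.takeWhile (fun c => !(c == '['))) =
      farm.toList.takeWhile (fun c => !(c == '[')) := by
    rw [if_neg (by simpa using hFp')]
  rw [hsplit] at heql
  simp only [List.flatMap_cons, pvSeg1, pvSeg2, pvBr, hr1p,
    if_neg (show ¬ ((some '[' == some ']' &&
      !(farm.toList.takeWhile (fun c => !(c == '['))).contains 'F') = true) from by simp)] at heql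
  by_cases hpin : ']' ∈ farm.toList.takeWhile (fun c => !(c == '['))
  · -- first ']' inside p: leaked A keeps q verbatim, B replaces its chicks
    obtain ⟨hpdec, hqno⟩ := split_at_mem (farm.toList.takeWhile (fun c => !(c == '['))) ']' hpin
    have hpr : '[' ∉ (farm.toList.takeWhile (fun c => !(c == '['))).takeWhile
          (fun c => !(c == ']')) ∧
        '[' ∉ ((farm.toList.takeWhile (fun c => !(c == '['))).dropWhile
          (fun c => !(c == ']'))).tail := by
      rw [hpdec] at hpnotog
      simp only [List.mem_append, List.mem_cons, not_or] at hpnotog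
      exact ⟨hpnotog.1, hpnotog.2.2⟩
    rw [hpdec] at heql
    rw [show ((farm.toList.takeWhile (fun c => !(c == '['))).takeWhile (fun c => !(c == ']')) ++
          ']' :: ((farm.toList.takeWhile (fun c => !(c == '['))).dropWhile
            (fun c => !(c == ']'))).tail) ++ ['['] ++
          (pvSegs ((farm.toList.dropWhile (fun c => !(c == '['))).tail) true []).flatMap pvSeg1 =
        (farm.toList.takeWhile (fun c => !(c == '['))).takeWhile (fun c => !(c == ']')) ++
          ']' :: (((farm.toList.takeWhile (fun c => !(c == '['))).dropWhile
            (fun c => !(c == ']'))).tail ++ '[' ::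
          (pvSegs ((farm.toList.dropWhile (fun c => !(c == '['))).tail) true []).flatMap pvSeg1)
        from by simp] at heql
    rw [leak_run1 _ hshape_rest _ _ hqno hpr.2] at heql
    rw [show pvRep ((farm.toList.takeWhile (fun c => !(c == '['))).takeWhile
          (fun c => !(c == ']')) ++
          ']' :: ((farm.toList.takeWhile (fun c => !(c == '['))).dropWhile
            (fun c => !(c == ']'))).tail) =
        pvRep ((farm.toList.takeWhile (fun c => !(c == '['))).takeWhile
          (fun c => !(c == ']'))) ++
          ']' :: pvRep (((farm.toList.takeWhile (fun c => !(c == '['))).dropWhile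
            (fun c => !(c == ']'))).tail) from by simp [pvRep_append, pvRep_cons]] at heql
    rw [show (pvRep ((farm.toList.takeWhile (fun c => !(c == '['))).takeWhile
          (fun c => !(c == ']'))) ++
          ']' :: pvRep (((farm.toList.takeWhile (fun c => !(c == '['))).dropWhile
            (fun c => !(c == ']'))).tail)) ++ ['['] ++
          (pvSegs ((farm.toList.dropWhile (fun c => !(c == '['))).tail) true []).flatMap pvSeg2 =
        pvRep ((farm.toList.takeWhile (fun c => !(c == '['))).takeWhile
          (fun c => !(c == ']'))) ++
          ']' :: (pvRep (((farm.toList.takeWhile (fun c => !(c == '['))).dropWhile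
            (fun c => !(c == ']'))).tail) ++ '[' ::
          (pvSegs ((farm.toList.dropWhile (fun c => !(c == '['))).tail) true []).flatMap pvSeg2)
        from by simp] at heql
    have hlen : ((farm.toList.takeWhile (fun c => !(c == '['))).takeWhile
        (fun c => !(c == ']'))).length =
        (pvRep ((farm.toList.takeWhile (fun c => !(c == '['))).takeWhile
          (fun c => !(c == ']')))).length := by
      rw [pvRep_length]
    have := (List.append_inj heql hlen).1
    exact rep_ne_of_memC _ hCq this
  · -- ']' not in p: A keeps p verbatim, B replaces its chicks
    have hCp : 'C' ∈ farm.toList.takeWhile (fun c => !(c == '[')) := by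
      have hq_eq : (farm.toList.takeWhile (fun c => !(c == '['))).takeWhile
          (fun c => !(c == ']')) = farm.toList.takeWhile (fun c => !(c == '[')) :=
        takeWhile_all _ ']' hpin
      rw [← hq_eq]
      exact hCq
    have hldec := (split_at_mem farm.toList '[' hopen).1
    have hl'close : ']' ∈ (farm.toList.dropWhile (fun c => !(c == '['))).tail := by
      rw [hldec] at hclose
      simp only [List.mem_append, List.mem_cons] at hclose
      rcases hclose with h1 | h1 | h1
      · exact absurd h1 hpin
      · exact absurd h1.symm (by decide)
      · exact h1
    have hsplit2 : pvSegs ((farm.toList.dropWhile (fun c => !(c == '['))).tail) true [] =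
        (((farm.toList.dropWhile (fun c => !(c == '['))).tail).takeWhile
          (fun c => !(c == ']')), some ']') ::
        pvSegs (((((farm.toList.dropWhile (fun c => !(c == '['))).tail)).dropWhile
          (fun c => !(c == ']'))).tail) false [] := by
      have := segs_split ((farm.toList.dropWhile (fun c => !(c == '['))).tail) true []
        (by simpa using hl'close)
      simpa using this
    have hs1no : ']' ∉ ((farm.toList.dropWhile (fun c => !(c == '['))).tail).takeWhile
        (fun c => !(c == ']')) :=
      (split_at_mem ((farm.toList.dropWhile (fun c => !(c == '['))).tail) ']' hl'close).2
    have hshape2 : PvShape false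
        (pvSegs (((((farm.toList.dropWhile (fun c => !(c == '['))).tail)).dropWhile
          (fun c => !(c == ']'))).tail) false []) :=
      shape_segs _ false [] (by simp)
    have hs1r1 : ']' ∉ (if (((farm.toList.dropWhile (fun c => !(c == '['))).tail).takeWhile
        (fun c => !(c == ']'))).contains 'F' then
        pvRep (((farm.toList.dropWhile (fun c => !(c == '['))).tail).takeWhile
          (fun c => !(c == ']'))) else
        ((farm.toList.dropWhile (fun c => !(c == '['))).tail).takeWhile
          (fun c => !(c == ']'))) :=
      r1_not_mem _ ']' (by decide) hs1no
    rw [hsplit2] at heql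
    simp only [List.flatMap_cons, pvSeg1, pvSeg2, pvBr] at heql
    rw [show farm.toList.takeWhile (fun c => !(c == '[')) ++ ['['] ++
          ((if (((farm.toList.dropWhile (fun c => !(c == '['))).tail).takeWhile
              (fun c => !(c == ']'))).contains 'F' then
            pvRep (((farm.toList.dropWhile (fun c => !(c == '['))).tail).takeWhile
              (fun c => !(c == ']'))) else
            ((farm.toList.dropWhile (fun c => !(c == '['))).tail).takeWhile
              (fun c => !(c == ']'))) ++ [']'] ++
          (pvSegs (((((farm.toList.dropWhile (fun c => !(c == '['))).tail)).dropWhile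
            (fun c => !(c == ']'))).tail) false []).flatMap pvSeg1) =
        farm.toList.takeWhile (fun c => !(c == '[')) ++ '[' ::
          ((if (((farm.toList.dropWhile (fun c => !(c == '['))).tail).takeWhile
              (fun c => !(c == ']'))).contains 'F' then
            pvRep (((farm.toList.dropWhile (fun c => !(c == '['))).tail).takeWhile
              (fun c => !(c == ']'))) else
            ((farm.toList.dropWhile (fun c => !(c == '['))).tail).takeWhile
              (fun c => !(c == ']'))) ++ ']' ::
          (pvSegs (((((farm.toList.dropWhile (fun c => !(c == '['))).tail)).dropWhile
            (fun c => !(c == ']'))).tail) false []).flatMap pvSeg1)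
        from by simp] at heql
    rw [leak_run2 _ hshape2 _ _ hpin hs1r1] at heql
    have hseg2in : (if (some ']' == some ']' &&
        !(((farm.toList.dropWhile (fun c => !(c == '['))).tail).takeWhile
          (fun c => !(c == ']'))).contains 'F') = true then
        ((farm.toList.dropWhile (fun c => !(c == '['))).tail).takeWhile
          (fun c => !(c == ']')) else
        pvRep (((farm.toList.dropWhile (fun c => !(c == '['))).tail).takeWhile
          (fun c => !(c == ']')))) =
        (if (((farm.toList.dropWhile (fun c => !(c == '['))).tail).takeWhile
          (fun c => !(c == ']'))).contains 'F' then
        pvRep (((farm.toList.dropWhile (fun c => !(c == '['))).tail).takeWhile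
          (fun c => !(c == ']'))) else
        ((farm.toList.dropWhile (fun c => !(c == '['))).tail).takeWhile
          (fun c => !(c == ']'))) := by
      by_cases hF1 : 'F' ∈ ((farm.toList.dropWhile (fun c => !(c == '['))).tail).takeWhile
          (fun c => !(c == ']')) <;> simp [hF1]
    rw [hseg2in] at heql
    rw [show (pvRep (farm.toList.takeWhile (fun c => !(c == '[')))) ++ ['['] ++
          ((if (((farm.toList.dropWhile (fun c => !(c == '['))).tail).takeWhile
              (fun c => !(c == ']'))).contains 'F' then
            pvRep (((farm.toList.dropWhile (fun c => !(c == '['))).tail).takeWhile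
              (fun c => !(c == ']'))) else
            ((farm.toList.dropWhile (fun c => !(c == '['))).tail).takeWhile
              (fun c => !(c == ']'))) ++ [']'] ++
          (pvSegs (((((farm.toList.dropWhile (fun c => !(c == '['))).tail)).dropWhile
            (fun c => !(c == ']'))).tail) false []).flatMap pvSeg2) =
        (pvRep (farm.toList.takeWhile (fun c => !(c == '['))) ++ '[' ::
          (if (((farm.toList.dropWhile (fun c => !(c == '['))).tail).takeWhile
              (fun c => !(c == ']'))).contains 'F' then
            pvRep (((farm.toList.dropWhile (fun c => !(c == '['))).tail).takeWhile
              (fun c => !(c == ']'))) else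
            ((farm.toList.dropWhile (fun c => !(c == '['))).tail).takeWhile
              (fun c => !(c == ']')))) ++ ']' ::
          (pvSegs (((((farm.toList.dropWhile (fun c => !(c == '['))).tail)).dropWhile
            (fun c => !(c == ']'))).tail) false []).flatMap pvSeg2
        from by simp] at heql
    have hlen : (farm.toList.takeWhile (fun c => !(c == '[')) ++ '[' ::
        (if (((farm.toList.dropWhile (fun c => !(c == '['))).tail).takeWhile
            (fun c => !(c == ']'))).contains 'F' then
          pvRep (((farm.toList.dropWhile (fun c => !(c == '['))).tail).takeWhile
            (fun c => !(c == ']'))) else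
          ((farm.toList.dropWhile (fun c => !(c == '['))).tail).takeWhile
            (fun c => !(c == ']')))).length =
        (pvRep (farm.toList.takeWhile (fun c => !(c == '[')))  ++ '[' ::
        (if (((farm.toList.dropWhile (fun c => !(c == '['))).tail).takeWhile
            (fun c => !(c == ']'))).contains 'F' then
          pvRep (((farm.toList.dropWhile (fun c => !(c == '['))).tail).takeWhile
            (fun c => !(c == ']'))) else
          ((farm.toList.dropWhile (fun c => !(c == '['))).tail).takeWhile
            (fun c => !(c == ']')))).length := by
      simp [pvRep_length]
    have hpe := (List.append_inj heql hlen).1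
    have hpe2 : farm.toList.takeWhile (fun c => !(c == '[')) =
        pvRep (farm.toList.takeWhile (fun c => !(c == '['))) :=
      (List.append_inj hpe (by rw [pvRep_length])).1
    exact rep_ne_of_memC _ hCp hpe2

-- ===== VERDICT (by name: the statement is the Claim_ definition above) =====
theorem hungry_foxes_spec : Claim_unchanged_hungry_foxes := by
  intro farm _ hnd
  exact main_eq farm hnd

theorem hungry_foxes_changed : Claim_changed_hungry_foxes := by
  unfold Claim_changed_hungry_foxes; decide

theorem hungry_foxes_tight : Claim_exact_hungry_foxes := by
  intro farm _ hD
  exact diff_case farm hD
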